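-- pv_equiv track=rewrite | github.com/ANANDHANAADHI/Smartdrugstore | Hospital/reader.py | rearrange_even_odd
-- ===== SOURCE A (Python) =====
-- def rearrange_even_odd(arr):
--     # sort the array in increasing order
--     arr.sort()
--
--     # create two lists for even and odd numbers
--     even_nums = [num for num in arr if num % 2 == 0]
--     odd_nums = [num for num in arr if num % 2 == 1]
--
--     # merge the two lists alternatively
--     res = []
--     while len(even_nums) > 0 and len(odd_nums) > 0:
--         res.append(even_nums.pop(0))
--         res.append(odd_nums.pop(0))
--
--     # add any remaining even or odd numbers to the end of the result
--     if len(even_nums) > 0: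
--         res += even_nums
--     if len(odd_nums) > 0:
--         res += odd_nums
--
--     # return the rearranged array as a string
--     return ','.join(str(num) for num in res)
-- ===== SOURCE B (Python) =====
-- def rearrange_even_odd(arr):
--     # sort the array in increasing order (in place, like A)
--     arr.sort()
--
--     # partition into evens and odds, same filters as A
--     even_nums = [num for num in arr if num % 2 == 0]
--     odd_nums = [num for num in arr if num % 2 == 1]
--
--     # interleave the common prefix with zip, then append the leftover tail
--     k = min(len(even_nums), len(odd_nums))
--     res = [x for pair in zip(even_nums, odd_nums) for x in pair]
--     res += even_nums[k:]
--     res += odd_nums[k:]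
--
--     return ','.join(str(num) for num in res)
-- ===== Notes on version B (the rewrite author's own statement) =====
-- stated objective: faster
-- what changed: Replaces the destructive while-pop(0) alternating merge and its two remainder branches with a zip-based interleave of the common prefix followed by slicing off the leftover tails.
import Mathlib
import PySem

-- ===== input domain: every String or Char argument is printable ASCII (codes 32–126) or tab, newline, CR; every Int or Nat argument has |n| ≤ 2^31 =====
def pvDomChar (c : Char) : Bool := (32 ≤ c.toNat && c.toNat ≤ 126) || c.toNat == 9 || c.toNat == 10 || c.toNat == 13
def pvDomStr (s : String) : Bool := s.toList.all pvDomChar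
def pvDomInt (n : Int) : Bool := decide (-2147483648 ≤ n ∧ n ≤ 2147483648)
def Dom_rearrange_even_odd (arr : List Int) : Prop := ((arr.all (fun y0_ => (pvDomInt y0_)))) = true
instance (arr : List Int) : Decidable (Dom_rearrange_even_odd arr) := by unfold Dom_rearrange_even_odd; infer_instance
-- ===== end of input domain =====

-- B replaces A's while-pop(0) alternating merge with a zip interleave plus sliced tails (same return value; both sort their argument in place in Python).
-- ===== PORT A =====
-- while len(even_nums) > 0 and len(odd_nums) > 0: pop heads alternately; then append the nonempty remainder
def pvMergeA : List Int → List Int → List Int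
  | e :: es, o :: os => e :: o :: pvMergeA es os
  | es, os => es ++ os

def rearrange_even_odd (arr : List Int) : String :=
  let sortedArr := PySem.List.sorted arr (fun x => x) false
  let even_nums := sortedArr.filter (fun num => PySem.Int.mod num 2 == 0)
  let odd_nums := sortedArr.filter (fun num => PySem.Int.mod num 2 == 1)
  let res := pvMergeA even_nums odd_nums
  PySem.Str.join "," (res.map PySem.Int.toStr)

-- ===== PORT B =====
def rearrange_even_odd_alt (arr : List Int) : String :=
  let sortedArr := PySem.List.sorted arr (fun x => x) false
  let even_nums := sortedArr.filter (fun num => PySem.Int.mod num 2 == 0)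
  let odd_nums := sortedArr.filter (fun num => PySem.Int.mod num 2 == 1)
  let k := min even_nums.length odd_nums.length
  -- [x for pair in zip(even_nums, odd_nums) for x in pair]; even_nums[k:] / odd_nums[k:] with k ≥ 0 is drop k
  let res := (even_nums.zip odd_nums).flatMap (fun p => [p.1, p.2]) ++ even_nums.drop k ++ odd_nums.drop k
  PySem.Str.join "," (res.map PySem.Int.toStr)

-- ===== PRECONDITION & SPEC =====
def Spec_rearrange_even_odd (arr : List Int) (out : String) : Prop := out = rearrange_even_odd_alt arr
instance (arr : List Int) (out : String) : Decidable (Spec_rearrange_even_odd arr out) := by unfold Spec_rearrange_even_odd; infer_instance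

-- ===== CLAIM (what is proved, stated in full; the proofs are below) =====
def Claim_equal_rearrange_even_odd : Prop := ∀ (arr : List Int), Dom_rearrange_even_odd arr → Spec_rearrange_even_odd arr (rearrange_even_odd arr)

-- ===== LEMMAS AND PROOFS =====
lemma pvMergeA_eq_zip (es os : List Int) :
    pvMergeA es os =
      (es.zip os).flatMap (fun p => [p.1, p.2]) ++
        es.drop (min es.length os.length) ++ os.drop (min es.length os.length) := by
  induction es generalizing os with
  | nil => simp [pvMergeA]
  | cons e es ih =>
    cases os with
    | nil => simp [pvMergeA]
    | cons o os =>
      simp [pvMergeA, ih os, Nat.succ_min_succ]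

-- ===== VERDICT (by name: the statement is the Claim_ definition above) =====
theorem rearrange_even_odd_spec : Claim_equal_rearrange_even_odd := by
  intro arr _
  unfold Spec_rearrange_even_odd rearrange_even_odd rearrange_even_odd_alt
  simp [pvMergeA_eq_zip]
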